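-- pv_equiv track=rewrite | github.com/pjoscely/Advent-Of-Code-2019 | Advent of Code 2019 Day 8.py | getLayerData
-- ===== SOURCE A (Python) =====
-- def getLayerData(layer):
--     z = 0
--     o = 0
--     t = 0
--     for d in layer:
--         if d == str(0):
--             z+=1
--         elif d ==str(1):
--             o+=1
--         else:
--             t+=1
--     return (z,o,t)
-- ===== SOURCE B (Python) =====
-- def getLayerData(layer):
--     z = layer.count('0')
--     o = layer.count('1')
--     return (z, o, len(layer) - z - o)
-- ===== Notes on version B (the rewrite author's own statement) =====
-- stated objective: idiomatic
-- what changed: Replaces the single loop with per-element if/elif/else branching by whole-sequence count() tallies, deriving the 'others' bucket by subtraction from the length instead of an else-branch increment.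
import Mathlib
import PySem

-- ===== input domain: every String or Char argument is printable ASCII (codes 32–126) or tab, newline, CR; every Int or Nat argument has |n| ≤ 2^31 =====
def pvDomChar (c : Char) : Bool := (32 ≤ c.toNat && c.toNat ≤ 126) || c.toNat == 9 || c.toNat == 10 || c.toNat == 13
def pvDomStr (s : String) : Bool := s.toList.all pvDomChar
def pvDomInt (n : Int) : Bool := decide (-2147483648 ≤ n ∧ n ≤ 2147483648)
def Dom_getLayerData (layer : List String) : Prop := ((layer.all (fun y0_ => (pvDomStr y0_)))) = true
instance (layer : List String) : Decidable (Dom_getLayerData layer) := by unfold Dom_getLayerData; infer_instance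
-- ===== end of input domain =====

-- B tallies with count() and derives the 'others' bucket by subtraction instead of a per-element else-branch.


-- ===== PORT A =====
def getLayerData (layer : List String) : Int × Int × Int :=
  layer.foldl (fun (s : Int × Int × Int) d =>
    if d == PySem.Int.toStr 0 then (s.1 + 1, s.2.1, s.2.2)
    else if d == PySem.Int.toStr 1 then (s.1, s.2.1 + 1, s.2.2)
    else (s.1, s.2.1, s.2.2 + 1)) (0, 0, 0)

-- ===== PORT B =====
def getLayerData_alt (layer : List String) : Int × Int × Int :=
  let z : Int := PySem.List.count layer "0"
  let o : Int := PySem.List.count layer "1"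
  (z, o, (layer.length : Int) - z - o)

-- ===== PRECONDITION & SPEC =====
def Spec_getLayerData (layer : List String) (out : Int × Int × Int) : Prop := out = getLayerData_alt layer
instance (layer : List String) (out : Int × Int × Int) : Decidable (Spec_getLayerData layer out) := by unfold Spec_getLayerData; infer_instance

-- ===== CLAIM (what is proved, stated in full; the proofs are below) =====
def Claim_equal_getLayerData : Prop := ∀ (layer : List String), Dom_getLayerData layer → Spec_getLayerData layer (getLayerData layer)

-- ===== LEMMAS AND PROOFS =====
theorem getLayerData_loop (l : List String) (z o t : Int) :
    l.foldl (fun (s : Int × Int × Int) d =>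
      if d == PySem.Int.toStr 0 then (s.1 + 1, s.2.1, s.2.2)
      else if d == PySem.Int.toStr 1 then (s.1, s.2.1 + 1, s.2.2)
      else (s.1, s.2.1, s.2.2 + 1)) (z, o, t)
    = (z + PySem.List.count l "0", o + PySem.List.count l "1",
       t + ((l.length : Int) - PySem.List.count l "0" - PySem.List.count l "1")) := by
  rw [show PySem.Int.toStr 0 = "0" from by decide, show PySem.Int.toStr 1 = "1" from by decide]
  induction l generalizing z o t with
  | nil => simp [PySem.List.count]
  | cons d tl ih =>
    rw [List.foldl_cons]
    by_cases h0 : d = "0"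
    · rw [if_pos (by simp [h0]), ih]
      simp only [PySem.List.count, List.count_cons, h0]
      refine Prod.ext ?_ (Prod.ext ?_ ?_) <;> simp <;> push_cast <;> omega
    · by_cases h1 : d = "1"
      · rw [if_neg (by simp [h0]), if_pos (by simp [h1]), ih]
        simp only [PySem.List.count, List.count_cons, h1]
        have : ¬ ("1" : String) = "0" := by decide
        refine Prod.ext ?_ (Prod.ext ?_ ?_) <;> simp [this] <;> push_cast <;> omega
      · rw [if_neg (by simp [h0]), if_neg (by simp [h1]), ih]
        simp only [PySem.List.count, List.count_cons]
        refine Prod.ext ?_ (Prod.ext ?_ ?_) <;> simp [h0, h1] <;> push_cast <;> omega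

-- ===== VERDICT (by name: the statement is the Claim_ definition above) =====
theorem getLayerData_spec : Claim_equal_getLayerData := by
  intro layer _
  unfold Spec_getLayerData getLayerData getLayerData_alt
  rw [getLayerData_loop]
  simp
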